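-- pv_equiv track=rewrite | github.com/joshanashakya/dissertation | workspace/dataset/java-python/GeeksForGeeks/2662/A/2.py | countCommonDivisors
-- ===== SOURCE A (Python) =====
-- def check(s, k):
--
--     for i in range (0, len(s)):
--
--         if (s[i] != s[i % k]):
--
--             return False
--
--     return True
--
-- def countCommonDivisors(a, b):
--
--     ct = 0
--     n = len(a)
--     m = len(b)
--     for i in range(1, min(n, m) + 1):
--
--         # If the length of the sub-string
--         # divides length of both the strings
--         if (n % i == 0 and m % i == 0):
--
--             # If prefixes match in both the strings
--             if (a[0 : i] == b[0 : i]) :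
--
--                 # by repeating the current prefix
--
--                 # If both the strings can be generated
--                 if (check(a, i) and check(b, i)) :
--
--                     ct = ct + 1
--
--     return ct
-- ===== SOURCE B (Python) =====
-- def _generates(a, b, n, m, d):
--     # the prefix of length d must be shared and generate both strings by repetition
--     p = a[:d]
--     return p == b[:d] and p * (n // d) == a and p * (m // d) == b
--
-- def countCommonDivisors(a, b):
--     n = len(a)
--     m = len(b)
--     # Euclid's algorithm: g = gcd(n, m)
--     x, y = n, m
--     while y:
--         x, y = y, x % y
--     g = x
--     ct = 0
--     d = 1
--     # enumerate divisors of g in pairs (d, g // d) up to sqrt(g)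
--     while d * d <= g:
--         if g % d == 0:
--             if _generates(a, b, n, m, d):
--                 ct += 1
--             e = g // d
--             if e != d and _generates(a, b, n, m, e):
--                 ct += 1
--         d += 1
--     return ct
-- ===== Notes on version B (the rewrite author's own statement) =====
-- stated objective: faster
-- what changed: B replaces A's sweep over every length 1..min(n,m) with Euclid's gcd followed by paired divisor enumeration up to sqrt(gcd), and replaces A's per-candidate character-by-character modular scan (helper check) by a single slice-repetition equality p*(len//d)==s.
import Mathlib
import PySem

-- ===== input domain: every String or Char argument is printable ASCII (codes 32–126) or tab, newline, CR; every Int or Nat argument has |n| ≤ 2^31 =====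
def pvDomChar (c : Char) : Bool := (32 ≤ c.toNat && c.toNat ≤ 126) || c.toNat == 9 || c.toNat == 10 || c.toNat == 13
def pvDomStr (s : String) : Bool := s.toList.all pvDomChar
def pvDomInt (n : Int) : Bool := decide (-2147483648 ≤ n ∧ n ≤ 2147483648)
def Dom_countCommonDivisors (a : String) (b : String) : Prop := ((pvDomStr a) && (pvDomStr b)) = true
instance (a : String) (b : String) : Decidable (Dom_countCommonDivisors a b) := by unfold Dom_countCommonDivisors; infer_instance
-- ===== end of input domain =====

-- B replaces A's 1..min(n,m) sweep plus per-candidate modular character scan by Euclid's gcd,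
-- paired divisor enumeration up to sqrt(gcd), and a slice-repetition equality test (objective: faster).

-- ===== PORT A =====

-- helper `check(s, k)`: the index loop `for i in range(0, len(s))`
def checkGo (s : List Char) (k : Int) (i : Nat) : Bool :=
  if _h : i < s.length then
    if PySem.List.pyGet? s (i : Int) ≠ PySem.List.pyGet? s (PySem.Int.mod (i : Int) k) then
      false
    else
      checkGo s k (i + 1)
  else
    true
termination_by s.length - i

def check (s : List Char) (k : Int) : Bool := checkGo s k 0

def countCommonDivisors (a : String) (b : String) : Int :=
  let la := a.toList
  let lb := b.toList
  let n : Int := la.length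
  let m : Int := lb.length
  (PySem.List.pyRange 1 (min n m + 1) 1).foldl (fun ct i =>
    if PySem.Int.mod n i == 0 && PySem.Int.mod m i == 0 then
      if PySem.List.slice la (some 0) (some i) == PySem.List.slice lb (some 0) (some i) then
        if check la i && check lb i then ct + 1 else ct
      else ct
    else ct) 0

-- ===== PORT B =====

-- `while y: x, y = y, x % y`
def gcdLoop (x y : Nat) : Nat :=
  if h : y = 0 then x else gcdLoop y (x % y)
termination_by y
decreasing_by exact Nat.mod_lt _ (Nat.pos_of_ne_zero h)

-- helper `_generates(a, b, n, m, d)`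
def generates (la lb : List Char) (n m d : Nat) : Bool :=
  let p := PySem.List.slice la none (some (d : Int))
  p == PySem.List.slice lb none (some (d : Int)) &&
    PySem.List.pyRepeat p ((n / d : Nat) : Int) == la &&
    PySem.List.pyRepeat p ((m / d : Nat) : Int) == lb

-- `while d * d <= g: ...`
def sqrtLoop (la lb : List Char) (n m g d : Nat) (ct : Int) : Int :=
  if h : d * d ≤ g then
    let ct1 :=
      if g % d == 0 then
        let ct0 := if generates la lb n m d then ct + 1 else ct
        let e := g / d
        if e != d && generates la lb n m e then ct0 + 1 else ct0
      else ct
    sqrtLoop la lb n m g (d + 1) ct1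
  else ct
termination_by g + 1 - d
decreasing_by
  have hd : d ≤ g := by
    rcases Nat.eq_zero_or_pos d with h0 | h0
    · omega
    · exact le_trans (Nat.le_mul_of_pos_left d h0) h
  omega

def countCommonDivisors_alt (a : String) (b : String) : Int :=
  let la := a.toList
  let lb := b.toList
  let n := la.length
  let m := lb.length
  let g := gcdLoop n m
  sqrtLoop la lb n m g 1 0

-- ===== PRECONDITION & SPEC =====
def Spec_countCommonDivisors (a : String) (b : String) (out : Int) : Prop := out = countCommonDivisors_alt a b
instance (a : String) (b : String) (out : Int) : Decidable (Spec_countCommonDivisors a b out) := by unfold Spec_countCommonDivisors; infer_instance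

-- ===== CLAIM (what is proved, stated in full; the proofs are below) =====
def Claim_equal_countCommonDivisors : Prop := ∀ (a : String) (b : String), Dom_countCommonDivisors a b → Spec_countCommonDivisors a b (countCommonDivisors a b)

-- ===== LEMMAS AND PROOFS =====

-- B's while-loop gcd is Euclid's algorithm
lemma gcdLoop_eq (x y : Nat) : gcdLoop x y = Nat.gcd y x := by
  induction y using Nat.strong_induction_on generalizing x with
  | _ y ih =>
    rw [gcdLoop]
    split
    · simp [*]
    · rename_i h
      rw [ih (x % y) (Nat.mod_lt _ (Nat.pos_of_ne_zero h)) y]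
      exact (Nat.gcd_rec y x).symm

-- characterisation of A's helper `check`
lemma checkGo_iff (s : List Char) (d : Nat) (i : Nat) :
    checkGo s (d : Int) i = true ↔ ∀ j, i ≤ j → j < s.length → s[j]? = s[j % d]? := by
  induction hfuel : s.length - i generalizing i with
  | zero =>
    rw [checkGo]
    rw [dif_neg (by omega)]
    simp only [true_iff]
    intro j hj hjl; omega
  | succ t ih =>
    rw [checkGo, dif_pos (by omega)]
    rw [PySem.Int.mod_natCast, PySem.List.pyGet?_natCast, PySem.List.pyGet?_natCast]
    by_cases he : s[i]? = s[i % d]?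
    · rw [if_neg (by simpa using he), ih (i+1) (by omega)]
      constructor
      · intro h j hij hjl
        rcases Nat.eq_or_lt_of_le hij with rfl | hlt
        · exact he
        · exact h j hlt hjl
      · intro h j hij hjl
        exact h j (by omega) hjl
    · rw [if_pos (by simpa using he)]
      simp only [Bool.false_eq_true, false_iff]
      intro h
      exact he (h i (le_refl i) (by omega))

lemma check_iff (s : List Char) (d : Nat) :
    check s (d : Int) = true ↔ ∀ j, j < s.length → s[j]? = s[j % d]? := by
  rw [check, checkGo_iff s d 0]
  exact ⟨fun h j hj => h j (Nat.zero_le j) hj, fun h j _ hj => h j hj⟩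

-- indexing into a repeated block
lemma flatten_replicate_getElem? (t : List Char) (q i : Nat) :
    ((List.replicate q t).flatten)[i]? = if i < q * t.length then t[i % t.length]? else none := by
  induction q generalizing i with
  | zero => simp
  | succ q ih =>
    rw [List.replicate_succ, List.flatten_cons, List.getElem?_append]
    by_cases h : i < t.length
    · rw [if_pos h, if_pos, Nat.mod_eq_of_lt h]
      calc i < t.length := h
        _ ≤ (q+1) * t.length := Nat.le_mul_of_pos_left _ (Nat.succ_pos q)
    · rw [if_neg h, ih]
      rcases Nat.eq_zero_or_pos t.length with h0 | h0
      · simp [h0]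
      · have hle : t.length ≤ i := Nat.le_of_not_lt h
        have hmod : (i - t.length) % t.length = i % t.length := by
          conv_rhs => rw [← Nat.sub_add_cancel hle]
          rw [Nat.add_mod_right]
        rw [hmod]
        have hiff : i - t.length < q * t.length ↔ i < (q+1) * t.length := by
          rw [Nat.succ_mul]; omega
        rw [if_congr hiff rfl rfl]

-- repetition equality ↔ modular periodicity (for a divisor of the length)
lemma repeat_eq_iff (la : List Char) (d : Nat) (hd : 0 < d) (hdvd : d ∣ la.length) :
    ((List.replicate (la.length / d) (la.take d)).flatten = la) ↔
      (∀ j, j < la.length → la[j]? = la[j % d]?) := by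
  rcases Nat.eq_zero_or_pos la.length with h0 | h0
  · rw [List.length_eq_zero_iff] at h0
    subst h0
    simp
  · have ht : (la.take d).length = d := by
      have hdn : d ≤ la.length := Nat.le_of_dvd h0 hdvd
      rw [List.length_take]; omega
    rw [List.ext_getElem?_iff]
    have hflat : ∀ i, ((List.replicate (la.length / d) (la.take d)).flatten)[i]? =
        if i < la.length then la[i % d]? else none := by
      intro i
      rw [flatten_replicate_getElem?, ht, Nat.div_mul_cancel hdvd]
      by_cases hi : i < la.length
      · rw [if_pos hi, if_pos hi, List.getElem?_take, if_pos (Nat.mod_lt i hd)]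
      · rw [if_neg hi, if_neg hi]
    constructor
    · intro h j hj
      have := h j
      rw [hflat j, if_pos hj] at this
      exact this.symm
    · intro h i
      rw [hflat i]
      by_cases hi : i < la.length
      · rw [if_pos hi]; exact (h i hi).symm
      · rw [if_neg hi, eq_comm, List.getElem?_eq_none_iff]
        omega

-- the per-candidate predicates of A and B agree on common divisors
lemma pointwise (la lb : List Char) (d : Nat) (hd : 0 < d)
    (hn : d ∣ la.length) (hm : d ∣ lb.length) :
    ((la.take d == lb.take d) && (check la (d : Int) && check lb (d : Int)))
      = generates la lb la.length lb.length d := by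
  unfold generates
  dsimp only
  rw [PySem.List.slice_to_natCast, PySem.List.slice_to_natCast]
  rw [Bool.eq_iff_iff]
  simp only [Bool.and_eq_true, beq_iff_eq, PySem.List.pyRepeat, Int.toNat_natCast]
  rw [check_iff, check_iff, ← repeat_eq_iff la d hd hn, ← repeat_eq_iff lb d hd hm]
  constructor
  · rintro ⟨h1, h2, h3⟩
    rw [← h1] at h3
    exact ⟨⟨h1, h2⟩, h3⟩
  · rintro ⟨⟨h1, h2⟩, h3⟩
    rw [h1] at h3
    exact ⟨h1, h2, h3⟩

lemma generates_take_eq (la lb : List Char) (n m x : Nat)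
    (h : generates la lb n m x = true) : la.take x = lb.take x := by
  unfold generates at h
  dsimp only at h
  rw [PySem.List.slice_to_natCast, PySem.List.slice_to_natCast] at h
  simp only [Bool.and_eq_true, beq_iff_eq] at h
  exact h.1.1

-- the candidate block examined at step d of B's loop
def cand (g d : Nat) : List Nat :=
  if g % d = 0 then d :: (if g / d ≠ d then [g / d] else []) else []

def Dfrom (g d : Nat) : List Nat :=
  ((List.range (Nat.sqrt g + 1 - d)).map (· + d)).flatMap (cand g)

lemma le_sqrt_iff (d g : Nat) : d * d ≤ g ↔ d ≤ Nat.sqrt g := by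
  rw [Nat.le_sqrt', pow_two]

lemma Dfrom_cons (g d : Nat) (h : d ≤ Nat.sqrt g) :
    Dfrom g d = cand g d ++ Dfrom g (d + 1) := by
  unfold Dfrom
  have h1 : Nat.sqrt g + 1 - d = (Nat.sqrt g + 1 - (d+1)) + 1 := by omega
  rw [h1, List.range_succ_eq_map, List.map_cons, List.flatMap_cons, List.map_map]
  simp only [Nat.zero_add]
  congr 1
  congr 1
  apply List.map_congr_left
  intro k _
  simp [Function.comp]
  omega

lemma sqrtLoop_eq (la lb : List Char) (n m g : Nat) :
    ∀ t d ct, t = Nat.sqrt g + 1 - d →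
      sqrtLoop la lb n m g d ct = ct + (List.countP (generates la lb n m) (Dfrom g d) : Int) := by
  intro t
  induction t with
  | zero =>
    intro d ct ht
    rw [sqrtLoop, dif_neg (by rw [le_sqrt_iff]; omega)]
    unfold Dfrom
    have : Nat.sqrt g + 1 - d = 0 := by omega
    rw [this]
    simp
  | succ t ih =>
    intro d ct ht
    have hds : d ≤ Nat.sqrt g := by omega
    rw [sqrtLoop, dif_pos ((le_sqrt_iff d g).mpr hds)]
    rw [ih (d+1) _ (by omega), Dfrom_cons g d hds, List.countP_append]
    have hbody : (if g % d == 0 then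
        (if (g / d != d) && generates la lb n m (g / d) then
          (if generates la lb n m d then ct + 1 else ct) + 1
         else (if generates la lb n m d then ct + 1 else ct))
        else ct) = ct + (List.countP (generates la lb n m) (cand g d) : Int) := by
      unfold cand
      by_cases h0 : g % d = 0 <;> by_cases hne : g / d = d <;>
        by_cases hgd : generates la lb n m d = true <;>
        by_cases hge : generates la lb n m (g / d) = true <;>
        simp_all <;> ring
    rw [hbody]
    push_cast
    ring

lemma mem_cand (g d x : Nat) :
    x ∈ cand g d ↔ g % d = 0 ∧ (x = d ∨ (g / d ≠ d ∧ x = g / d)) := by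
  unfold cand
  by_cases h0 : g % d = 0 <;> by_cases hne : g / d = d <;> simp [h0, hne]

-- every element produced at step d of the enumeration carries the tag min x (g/x) = d
lemma cand_tag (g d x : Nat) (hg : g ≠ 0) (hd : 0 < d) (hsq : d * d ≤ g)
    (hx : x ∈ cand g d) : x ∣ g ∧ min x (g / x) = d := by
  rw [mem_cand] at hx
  obtain ⟨h0, hx⟩ := hx
  have hdvd : d ∣ g := Nat.dvd_of_mod_eq_zero h0
  have hle : d ≤ g / d := by
    by_contra hlt
    push_neg at hlt
    have : g < d * d := by
      calc g = g / d * d := (Nat.div_mul_cancel hdvd).symm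
        _ < d * d := (Nat.mul_lt_mul_right hd).mpr hlt
    omega
  rcases hx with rfl | ⟨hne, rfl⟩
  · exact ⟨hdvd, by omega⟩
  · refine ⟨Nat.div_dvd_of_dvd hdvd, ?_⟩
    rw [Nat.div_div_self hdvd hg]
    omega

lemma sq_le_of_le_sqrt (g d : Nat) (h : d ≤ Nat.sqrt g) : d * d ≤ g := by
  calc d * d ≤ Nat.sqrt g * Nat.sqrt g := Nat.mul_le_mul h h
    _ ≤ g := Nat.sqrt_le g

lemma mem_Dfrom_one (g : Nat) (hg : g ≠ 0) (x : Nat) :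
    x ∈ Dfrom g 1 ↔ x ∣ g := by
  unfold Dfrom
  simp only [List.mem_flatMap, List.mem_map, List.mem_range]
  constructor
  · rintro ⟨d, ⟨k, hk, rfl⟩, hx⟩
    exact (cand_tag g (k+1) x hg (by omega) (sq_le_of_le_sqrt g (k+1) (by omega)) hx).1
  · intro hx
    have hx1 : 0 < x := Nat.pos_of_dvd_of_pos hx (Nat.pos_of_ne_zero hg)
    by_cases hsq : x * x ≤ g
    · refine ⟨x, ⟨x - 1, ?_, by omega⟩, ?_⟩
      · have : x ≤ Nat.sqrt g := by rw [Nat.le_sqrt', pow_two]; exact hsq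
        omega
      · rw [mem_cand]
        exact ⟨Nat.mod_eq_zero_of_dvd hx, Or.inl rfl⟩
    · push_neg at hsq
      set d := g / x with hdx
      have hdvd : d ∣ g := Nat.div_dvd_of_dvd hx
      have hd1 : 0 < d := Nat.div_pos (Nat.le_of_dvd (Nat.pos_of_ne_zero hg) hx) hx1
      have hgx : g / x < x := (Nat.div_lt_iff_lt_mul hx1).mpr hsq
      have hdd : d * d < g := by
        calc d * d < d * x := (Nat.mul_lt_mul_left hd1).mpr hgx
          _ = g := by rw [hdx, Nat.div_mul_cancel hx]
      refine ⟨d, ⟨d - 1, ?_, by omega⟩, ?_⟩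
      · have : d ≤ Nat.sqrt g := by rw [Nat.le_sqrt', pow_two]; omega
        omega
      · rw [mem_cand]
        refine ⟨Nat.mod_eq_zero_of_dvd hdvd, Or.inr ⟨?_, ?_⟩⟩
        · rw [hdx, Nat.div_div_self hx hg]; omega
        · rw [hdx, Nat.div_div_self hx hg]

lemma nodup_Dfrom_one (g : Nat) : (Dfrom g 1).Nodup := by
  rcases Nat.eq_zero_or_pos g with rfl | hg
  · simp [Dfrom]
  unfold Dfrom
  rw [List.nodup_flatMap]
  constructor
  · intro d _
    unfold cand
    by_cases h0 : g % d = 0 <;> by_cases hne : g / d = d <;> simp [h0, hne]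
    omega
  · rw [List.pairwise_map]
    have hp : List.Pairwise (· < ·) (List.range (Nat.sqrt g + 1 - 1)) := List.pairwise_lt_range
    refine hp.imp_of_mem ?_
    intro a b ha hb hab
    rw [List.mem_range] at ha hb
    intro x hxa hxb
    have ta := (cand_tag g (a+1) x (by omega) (by omega)
      (sq_le_of_le_sqrt g (a+1) (by omega)) hxa).2
    have tb := (cand_tag g (b+1) x (by omega) (by omega)
      (sq_le_of_le_sqrt g (b+1) (by omega)) hxb).2
    omega

-- A's loop as a countP over the candidate lengths 1..min(n,m)
lemma A_eq_countP (a b : String) :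
    countCommonDivisors a b =
      (List.countP
        (fun k : Nat =>
          ((a.toList.length % (1 + k) == 0 && b.toList.length % (1 + k) == 0) &&
            (a.toList.take (1 + k) == b.toList.take (1 + k) &&
              (check a.toList ((1 + k : Nat) : Int) && check b.toList ((1 + k : Nat) : Int)))))
        (List.range (min a.toList.length b.toList.length)) : Int) := by
  unfold countCommonDivisors
  dsimp only
  set la := a.toList
  set lb := b.toList
  have hbody : (fun (ct : Int) (i : Int) =>
      if PySem.Int.mod (la.length : Int) i == 0 && PySem.Int.mod (lb.length : Int) i == 0 then
        if PySem.List.slice la (some 0) (some i) == PySem.List.slice lb (some 0) (some i) then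
          if check la i && check lb i then ct + 1 else ct
        else ct
      else ct)
      = fun ct i =>
        if ((PySem.Int.mod (la.length : Int) i == 0 && PySem.Int.mod (lb.length : Int) i == 0) &&
            (PySem.List.slice la (some 0) (some i) == PySem.List.slice lb (some 0) (some i) &&
              (check la i && check lb i))) then ct + 1 else ct := by
    funext ct i
    cases (PySem.Int.mod (la.length : Int) i == 0 && PySem.Int.mod (lb.length : Int) i == 0) <;>
      cases (PySem.List.slice la (some 0) (some i) == PySem.List.slice lb (some 0) (some i)) <;>
      cases (check la i && check lb i) <;> simp
  rw [hbody, PySem.List.foldl_count_if]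
  have hrange : PySem.List.pyRange 1 (min (la.length : Int) (lb.length : Int) + 1) 1
      = (List.range (min la.length lb.length)).map (fun k : Nat => (1 + k : Int)) := by
    rw [PySem.List.pyRange_one]
    have h2 : (min (la.length : Int) (lb.length : Int) + 1 - 1).toNat = min la.length lb.length := by
      omega
    rw [h2]
  rw [hrange, List.countP_map]
  norm_num
  congr 1
  funext k
  simp only [Function.comp]
  have h1 : (1 : Int) + (k : Int) = ((1 + k : Nat) : Int) := by push_cast; ring
  rw [h1, PySem.Int.mod_natCast, PySem.Int.mod_natCast]
  rw [PySem.List.slice_to_natCast, PySem.List.slice_to_natCast]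
  have hz : ∀ x : Nat, ((x : Int) == 0) = (x == 0) := by
    intro x
    rw [Bool.eq_iff_iff]
    simp
  rw [hz, hz]

-- the two counts agree
lemma main_eq (a b : String) : countCommonDivisors a b = countCommonDivisors_alt a b := by
  rw [A_eq_countP]
  unfold countCommonDivisors_alt
  dsimp only
  rw [gcdLoop_eq]
  set la := a.toList with hla
  set lb := b.toList with hlb
  set n := la.length with hn
  set m := lb.length with hm
  set g := Nat.gcd m n with hg
  rw [sqrtLoop_eq la lb n m g (Nat.sqrt g + 1 - 1) 1 0 rfl]
  set APfull : Nat → Bool := fun x =>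
      ((n % x == 0 && m % x == 0) &&
        (la.take x == lb.take x && (check la (x : Int) && check lb (x : Int)))) with hAP
  have hA : List.countP (fun k : Nat =>
        ((n % (1 + k) == 0 && m % (1 + k) == 0) &&
          (la.take (1 + k) == lb.take (1 + k) &&
            (check la ((1 + k : Nat) : Int) && check lb ((1 + k : Nat) : Int)))))
        (List.range (min n m))
      = List.countP APfull ((List.range (min n m)).map (fun k => 1 + k)) := by
    rw [List.countP_map]
    rfl
  rw [hA]
  have hnodupA : (((List.range (min n m)).map (fun k => 1 + k)).filter APfull).Nodup := by
    apply List.Nodup.filter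
    refine List.Nodup.map ?_ List.nodup_range
    intro u v huv
    have h' : 1 + u = 1 + v := huv
    omega
  have hnodupB : ((Dfrom g 1).filter (generates la lb n m)).Nodup :=
    List.Nodup.filter _ (nodup_Dfrom_one g)
  have hperm : (((List.range (min n m)).map (fun k => 1 + k)).filter APfull).Perm
      ((Dfrom g 1).filter (generates la lb n m)) := by
    rw [List.perm_ext_iff_of_nodup hnodupA hnodupB]
    intro x
    simp only [List.mem_filter, List.mem_map, List.mem_range]
    constructor
    · rintro ⟨⟨k, hk, rfl⟩, hap⟩
      rw [hAP] at hap
      simp only [Bool.and_eq_true, beq_iff_eq] at hap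
      obtain ⟨⟨hdn, hdm⟩, hrest⟩ := hap
      have hxn : (1 + k) ∣ n := Nat.dvd_of_mod_eq_zero hdn
      have hxm : (1 + k) ∣ m := Nat.dvd_of_mod_eq_zero hdm
      have hPg : generates la lb n m (1 + k) = true := by
        rw [← pointwise la lb (1 + k) (by omega) hxn hxm]
        simp only [Bool.and_eq_true, beq_iff_eq]
        exact hrest
      have hg0 : g ≠ 0 := by
        rw [hg, Ne, Nat.gcd_eq_zero_iff]
        omega
      refine ⟨?_, hPg⟩
      rw [mem_Dfrom_one g hg0]
      exact Nat.dvd_gcd hxm hxn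
    · rintro ⟨hxD, hPg⟩
      have hg0 : g ≠ 0 := by
        intro h0
        rw [h0] at hxD
        have : Dfrom 0 1 = ([] : List Nat) := rfl
        rw [this] at hxD
        exact absurd hxD (List.not_mem_nil)
      have hxg : x ∣ g := (mem_Dfrom_one g hg0 x).mp hxD
      have hx1 : 0 < x := Nat.pos_of_dvd_of_pos hxg (Nat.pos_of_ne_zero hg0)
      have hxm : x ∣ m := (Nat.dvd_gcd_iff.mp (hg ▸ hxg)).1
      have hxn : x ∣ n := (Nat.dvd_gcd_iff.mp (hg ▸ hxg)).2
      have htk : la.take x = lb.take x := generates_take_eq la lb n m x hPg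
      have hn0 : n ≠ 0 := by
        intro h0
        have hm0 : m ≠ 0 := by
          intro hm0
          apply hg0
          simp [hg, hm0, h0]
        have hlae : la = [] := List.length_eq_zero_iff.mp h0
        have : lb.take x ≠ [] := by
          intro he
          rcases List.take_eq_nil_iff.mp he with h | h
          · omega
          · exact hm0 (by rw [hm, h]; rfl)
        apply this
        rw [← htk, hlae, List.take_nil]
      have hm0 : m ≠ 0 := by
        intro h0
        have hlbe : lb = [] := List.length_eq_zero_iff.mp h0
        have : la.take x ≠ [] := by
          intro he
          rcases List.take_eq_nil_iff.mp he with h | h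
          · omega
          · exact hn0 (by rw [hn, h]; rfl)
        apply this
        rw [htk, hlbe, List.take_nil]
      have hxle : x ≤ min n m :=
        le_min (Nat.le_of_dvd (Nat.pos_of_ne_zero hn0) hxn)
          (Nat.le_of_dvd (Nat.pos_of_ne_zero hm0) hxm)
      refine ⟨⟨x - 1, by omega, by omega⟩, ?_⟩
      rw [hAP]
      simp only [Bool.and_eq_true, beq_iff_eq]
      refine ⟨⟨Nat.mod_eq_zero_of_dvd hxn, Nat.mod_eq_zero_of_dvd hxm⟩, ?_⟩
      have := pointwise la lb x hx1 hxn hxm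
      rw [← hn, ← hm] at this
      rw [← this] at hPg
      simp only [Bool.and_eq_true, beq_iff_eq] at hPg
      exact hPg
  rw [List.countP_eq_length_filter, List.countP_eq_length_filter, hperm.length_eq]
  norm_num

-- ===== VERDICT (by name: the statement is the Claim_ definition above) =====
theorem countCommonDivisors_spec : Claim_equal_countCommonDivisors := by
  intro a b _
  unfold Spec_countCommonDivisors
  exact main_eq a b
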